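-- pv_equiv track=rewrite | github.com/deniskrumko/advent-of-code | 2021/day_04/main.py | build_boards
-- ===== SOURCE A (Python) =====
-- def build_boards(data: list) -> list[list]:
--     """Build boards from input data."""
--     boards, new_board = [], []
--     for line in (data[2:] + ['']):
--         if line == '':
--             boards.append(new_board)
--             new_board = []
--             continue
--
--         line_int = [int(i) for i in line.split()]
--         new_board.append(line_int)
--
--     return boards
-- ===== SOURCE B (Python) =====
-- def build_boards(data: list) -> list[list]:
--     """Build boards from input data."""
--     def chunks(lines):
--         # split on blank lines, right-to-left; always one (possibly empty) trailing chunk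
--         if not lines:
--             return [[]]
--         head, rest = lines[0], chunks(lines[1:])
--         if head == '':
--             return [[]] + rest
--         return [[head] + rest[0]] + rest[1:]
--     return [[[int(x) for x in line.split()] for line in chunk]
--             for chunk in chunks(data[2:])]
-- ===== Notes on version B (the rewrite author's own statement) =====
-- stated objective: alternative
-- what changed: B replaces A's single left fold with a flush-accumulator state by a right-to-left recursive chunking of data[2:] at blank lines (always keeping a trailing, possibly empty, chunk) followed by a map that parses each chunk into a board.
import Mathlib
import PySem

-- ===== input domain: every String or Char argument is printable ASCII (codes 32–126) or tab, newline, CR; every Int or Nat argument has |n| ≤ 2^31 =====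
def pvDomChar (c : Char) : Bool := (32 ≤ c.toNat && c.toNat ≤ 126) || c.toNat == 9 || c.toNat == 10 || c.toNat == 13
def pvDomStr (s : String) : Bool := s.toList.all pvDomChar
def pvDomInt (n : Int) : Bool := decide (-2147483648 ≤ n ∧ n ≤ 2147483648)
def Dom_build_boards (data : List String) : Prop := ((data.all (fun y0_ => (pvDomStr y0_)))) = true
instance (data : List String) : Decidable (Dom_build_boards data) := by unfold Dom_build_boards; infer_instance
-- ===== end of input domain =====

-- B rebuilds the boards by right-to-left recursive chunking at blank lines instead of A's
-- left fold with a flush accumulator; same cost, different decomposition (objective: alternative).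

-- ===== PORT A =====
-- [int(i) for i in line.split()]; '.getD 0' is exact under Pre_ (every token parses)
def pvParseLine (line : String) : List Int :=
  (PySem.Str.split₀ line).map (fun t => (PySem.Int.ofStr? t).getD 0)

def pvStepA (st : List (List (List Int)) × List (List Int)) (line : String) :
    List (List (List Int)) × List (List Int) :=
  if line == "" then (st.1 ++ [st.2], ([] : List (List Int)))
  else (st.1, st.2 ++ [pvParseLine line])

def build_boards (data : List String) : List (List (List Int)) :=
  ((PySem.List.slice data (some 2) none ++ [""]).foldl pvStepA ([], [])).1

-- ===== PORT B =====
-- rest[0] / rest[1:] via headD / tail: chunks never returns [] (the default is unreachable)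
def pvChunks : List String → List (List String)
  | [] => [[]]
  | head :: tail =>
    let rest := pvChunks tail
    if head == "" then [] :: rest
    else (head :: rest.headD []) :: rest.tail

def build_boards_alt (data : List String) : List (List (List Int)) :=
  (pvChunks (PySem.List.slice data (some 2) none)).map (fun chunk => chunk.map pvParseLine)

-- ===== PRECONDITION & SPEC =====
-- Pre_ excludes exactly the inputs on which A raises ValueError: a non-blank line of data[2:]
-- containing a token int() rejects.
def Pre_build_boards (data : List String) : Prop :=
  ∀ line ∈ data.drop 2, ∀ t ∈ PySem.Str.split₀ line, (PySem.Int.ofStr? t).isSome = true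
instance (data : List String) : Decidable (Pre_build_boards data) := by
  unfold Pre_build_boards; infer_instance

def pvWitness_build_boards : List String := ["hdr", "", "1 2", "3 4", "", "+5 1_000"]

def Spec_build_boards (data : List String) (out : List (List (List Int))) : Prop :=
  out = build_boards_alt data
instance (data : List String) (out : List (List (List Int))) :
    Decidable (Spec_build_boards data out) := by unfold Spec_build_boards; infer_instance

-- ===== CLAIM (what is proved, stated in full; the proofs are below) =====
def Claim_equal_build_boards : Prop :=
  ∀ (data : List String), Dom_build_boards data → Pre_build_boards data →
    Spec_build_boards data (build_boards data)

-- ===== LEMMAS AND PROOFS =====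

def pvPre (cur : List (List Int)) : List (List (List Int)) → List (List (List Int))
  | [] => [cur]
  | c :: cs => (cur ++ c) :: cs

lemma pvChunks_ne_nil (lines : List String) : pvChunks lines ≠ [] := by
  cases lines with
  | nil => simp [pvChunks]
  | cons h t => simp only [pvChunks]; split <;> simp

lemma pvLoopA (lines : List String) (boards : List (List (List Int))) (cur : List (List Int)) :
    ((lines ++ [""]).foldl pvStepA (boards, cur)).1
      = boards ++ pvPre cur ((pvChunks lines).map (fun c => c.map pvParseLine)) := by
  induction lines generalizing boards cur with
  | nil => simp [pvStepA, pvChunks, pvPre]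
  | cons l ls ih =>
    simp only [List.cons_append, List.foldl_cons, pvStepA]
    by_cases hl : l = ""
    · subst hl
      simp only [beq_self_eq_true, if_true]
      rw [ih]
      obtain ⟨c, cs, hcc⟩ := List.exists_cons_of_ne_nil (pvChunks_ne_nil ls)
      simp [pvChunks, hcc, pvPre]
    · simp only [beq_eq_false_iff_ne.mpr hl]
      rw [ih]
      cases hcc : pvChunks ls with
      | nil => simp [pvChunks, hcc, pvPre, hl]
      | cons c cs => simp [pvChunks, hcc, pvPre, hl]

-- ===== VERDICT (by name: the statement is the Claim_ definition above) =====
theorem build_boards_spec : Claim_equal_build_boards := by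
  intro data _ _
  unfold Spec_build_boards build_boards build_boards_alt
  rw [pvLoopA]
  obtain ⟨c, cs, hcc⟩ := List.exists_cons_of_ne_nil (pvChunks_ne_nil (PySem.List.slice data (some 2) none))
  simp [hcc, pvPre]
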